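-- pv_equiv track=rewrite | github.com/bssoufo/vapi-tool-for-ange | vapi_manager/core/squad_template_creator.py | _infer_role_from_name
-- ===== SOURCE A (Python) =====
-- def _infer_role_from_name(assistant_name: str) -> str:
--     """Infer assistant role from name."""
--     name_lower = assistant_name.lower()
--
--     if any(word in name_lower for word in ['triage', 'reception', 'front', 'main']):
--         return 'primary_contact'
--     elif any(word in name_lower for word in ['book', 'schedule', 'appointment', 'calendar']):
--         return 'booking_specialist'
--     elif any(word in name_lower for word in ['info', 'information', 'research', 'data']):
--         return 'information_specialist'
--     elif any(word in name_lower for word in ['support', 'help', 'assist']):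
--         return 'support_specialist'
--     elif any(word in name_lower for word in ['sales', 'sell', 'consult']):
--         return 'sales_specialist'
--     elif any(word in name_lower for word in ['manager', 'supervisor', 'escalation']):
--         return 'manager'
--     else:
--         return 'specialist'
-- ===== SOURCE B (Python) =====
-- _KEYWORD_PRIORITY = {
--     'triage': 0, 'reception': 0, 'front': 0, 'main': 0,
--     'book': 1, 'schedule': 1, 'appointment': 1, 'calendar': 1,
--     'info': 2, 'information': 2, 'research': 2, 'data': 2,
--     'support': 3, 'help': 3, 'assist': 3,
--     'sales': 4, 'sell': 4, 'consult': 4,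
--     'manager': 5, 'supervisor': 5, 'escalation': 5,
-- }
-- _ROLES = ['primary_contact', 'booking_specialist', 'information_specialist',
--           'support_specialist', 'sales_specialist', 'manager']
-- _KEYWORD_LENGTHS = (4, 5, 6, 7, 8, 9, 10, 11)
--
--
-- def _infer_role_from_name(assistant_name: str) -> str:
--     """Dictionary matching: slide over the lowercased name, look each substring of a
--     keyword length up in a keyword->priority table, and keep the best (minimum)
--     priority seen; map it to its role."""
--     suffix = assistant_name.lower()
--     best = 6
--     while suffix:
--         for length in _KEYWORD_LENGTHS:
--             prio = _KEYWORD_PRIORITY.get(suffix[:length])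
--             if prio is not None and prio < best:
--                 best = prio
--         suffix = suffix[1:]
--     return _ROLES[best] if best < 6 else 'specialist'
-- ===== Notes on version B (the rewrite author's own statement) =====
-- stated objective: alternative
-- what changed: Replaces A's per-keyword substring searches in an if/elif chain by dictionary matching: B slides over the lowercased name, looks each substring of a keyword length up in a keyword->priority hash table, keeps the minimum priority seen, and maps it to its role.
import Mathlib
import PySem

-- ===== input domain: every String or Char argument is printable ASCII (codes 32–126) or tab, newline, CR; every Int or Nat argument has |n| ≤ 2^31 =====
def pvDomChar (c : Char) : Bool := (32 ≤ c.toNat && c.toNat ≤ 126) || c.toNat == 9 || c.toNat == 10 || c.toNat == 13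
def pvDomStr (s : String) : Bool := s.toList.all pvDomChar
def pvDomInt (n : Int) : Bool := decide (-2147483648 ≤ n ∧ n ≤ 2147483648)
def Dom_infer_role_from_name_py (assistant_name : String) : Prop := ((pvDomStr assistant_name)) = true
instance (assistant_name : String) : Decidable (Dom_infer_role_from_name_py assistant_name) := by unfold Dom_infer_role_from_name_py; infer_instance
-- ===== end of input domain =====

-- B replaces A's per-keyword substring searches (if/elif chain of 'any(word in name)')
-- by dictionary matching: slide over the lowercased name, look each substring of a
-- keyword length up in a keyword->priority table, keep the minimum priority (alternative algorithm).


-- ===== PORT A =====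
def infer_role_from_name_py (assistant_name : String) : String :=
  let name_lower := PySem.Str.lower assistant_name
  if ["triage", "reception", "front", "main"].any (fun word => PySem.Str.isIn word name_lower) then
    "primary_contact"
  else if ["book", "schedule", "appointment", "calendar"].any (fun word => PySem.Str.isIn word name_lower) then
    "booking_specialist"
  else if ["info", "information", "research", "data"].any (fun word => PySem.Str.isIn word name_lower) then
    "information_specialist"
  else if ["support", "help", "assist"].any (fun word => PySem.Str.isIn word name_lower) then
    "support_specialist"
  else if ["sales", "sell", "consult"].any (fun word => PySem.Str.isIn word name_lower) then
    "sales_specialist"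
  else if ["manager", "supervisor", "escalation"].any (fun word => PySem.Str.isIn word name_lower) then
    "manager"
  else
    "specialist"

-- ===== PORT B =====  (Source B: slide a suffix window, look substrings of keyword lengths up in _KEYWORD_PRIORITY, keep min priority)
def pvKeywords : List (String × Nat) :=
  [("triage", 0), ("reception", 0), ("front", 0), ("main", 0),
   ("book", 1), ("schedule", 1), ("appointment", 1), ("calendar", 1),
   ("info", 2), ("information", 2), ("research", 2), ("data", 2),
   ("support", 3), ("help", 3), ("assist", 3),
   ("sales", 4), ("sell", 4), ("consult", 4),
   ("manager", 5), ("supervisor", 5), ("escalation", 5)]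

def pvPrioDict : PySem.Dict String Nat := PySem.Dict.ofList pvKeywords

def pvRoles : List String :=
  ["primary_contact", "booking_specialist", "information_specialist",
   "support_specialist", "sales_specialist", "manager"]

def pvLens : List Nat := [4, 5, 6, 7, 8, 9, 10, 11]

-- one iteration of Source B's inner 'for length in _KEYWORD_LENGTHS' body (suffix[:length] = l.take L)
def pvStep (l : List Char) (b : Nat) (L : Nat) : Nat :=
  match pvPrioDict.get? (String.ofList (l.take L)) with
  | some p => if p < b then p else b
  | none => b

-- Source B's 'while suffix:' loop (suffix = suffix[1:] each round)
def pvScan : List Char → Nat → Nat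
  | [], best => best
  | c :: rest, best => pvScan rest (pvLens.foldl (pvStep (c :: rest)) best)

def infer_role_from_name_py_alt (assistant_name : String) : String :=
  let best := pvScan (PySem.Str.lower assistant_name).toList 6
  if best < 6 then pvRoles.getD best "specialist" else "specialist"

-- ===== PRECONDITION & SPEC =====
def Spec_infer_role_from_name_py (assistant_name : String) (out : String) : Prop := out = infer_role_from_name_py_alt assistant_name
instance (assistant_name : String) (out : String) : Decidable (Spec_infer_role_from_name_py assistant_name out) := by unfold Spec_infer_role_from_name_py; infer_instance

-- ===== CLAIM (what is proved, stated in full; the proofs are below) =====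
def Claim_equal_infer_role_from_name_py : Prop := ∀ (assistant_name : String), Dom_infer_role_from_name_py assistant_name → Spec_infer_role_from_name_py assistant_name (infer_role_from_name_py assistant_name)

-- ===== LEMMAS AND PROOFS =====

-- the six keyword groups, in rule order (proof-side view of the table)
def pvRules : List (List String) :=
  [["triage", "reception", "front", "main"],
   ["book", "schedule", "appointment", "calendar"],
   ["info", "information", "research", "data"],
   ["support", "help", "assist"],
   ["sales", "sell", "consult"],
   ["manager", "supervisor", "escalation"]]

-- per rule: some keyword occurs as an infix of l
def pvM (l : List Char) : List Bool := pvRules.map (fun ws => ws.any (fun w => PySem.Chars.isIn w.toList l))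
-- per rule: some keyword is a prefix of l
def pvQ (l : List Char) : List Bool := pvRules.map (fun ws => ws.any (fun w => decide (w.toList <+: l)))

def pvTarget (l : List Char) : Nat := (pvM l).findIdx id
def pvH (l : List Char) : Nat := (pvQ l).findIdx id

lemma pvStep_le (l : List Char) (b L : Nat) : pvStep l b L ≤ b := by
  unfold pvStep
  cases pvPrioDict.get? (String.ofList (l.take L)) with
  | none => exact le_refl b
  | some p => dsimp only; split_ifs <;> omega

lemma pvFold_le (l : List Char) (ls : List Nat) (b : Nat) : ls.foldl (pvStep l) b ≤ b := by
  induction ls generalizing b with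
  | nil => exact le_refl b
  | cons L ls ih => exact le_trans (ih (pvStep l b L)) (pvStep_le l b L)

lemma pvFold_attain (l : List Char) (ls : List Nat) (b : Nat) :
    ls.foldl (pvStep l) b = b ∨
    ∃ L ∈ ls, pvPrioDict.get? (String.ofList (l.take L)) = some (ls.foldl (pvStep l) b) := by
  induction ls generalizing b with
  | nil => exact Or.inl rfl
  | cons L ls ih =>
    rcases ih (pvStep l b L) with h | ⟨L', hL', hget⟩
    · rw [List.foldl_cons, h]
      unfold pvStep
      cases hg : pvPrioDict.get? (String.ofList (l.take L)) with
      | none => exact Or.inl rfl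
      | some p =>
        dsimp only
        split_ifs with hp
        · exact Or.inr ⟨L, List.mem_cons_self, hg⟩
        · exact Or.inl rfl
    · exact Or.inr ⟨L', List.mem_cons_of_mem _ hL', hget⟩

lemma pvFold_hit_le (l : List Char) (ls : List Nat) (b L p : Nat)
    (hL : L ∈ ls) (hget : pvPrioDict.get? (String.ofList (l.take L)) = some p) :
    ls.foldl (pvStep l) b ≤ p := by
  induction ls generalizing b with
  | nil => cases hL
  | cons L' ls ih =>
    rcases List.mem_cons.mp hL with rfl | hmem
    · have hstep : pvStep l b L ≤ p := by
        unfold pvStep; rw [hget]; dsimp only; split_ifs <;> omega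
      exact le_trans (pvFold_le l ls _) hstep
    · exact ih (pvStep l b L') hmem

-- dict inversion: a hit in the table is one of the 21 keyword/priority pairs
lemma pvItems : pvPrioDict.items = pvKeywords := by decide

lemma pvDict_inv (s : String) (p : Nat) (h : pvPrioDict.get? s = some p) : (s, p) ∈ pvKeywords := by
  have hm : (s, p) ∈ pvPrioDict.items := PySem.Dict.mem_items_of_get?_eq_some pvPrioDict h
  rwa [pvItems] at hm

lemma pvDict_fwd (s : String) (p : Nat) (h : (s, p) ∈ pvKeywords) : pvPrioDict.get? s = some p := by
  apply PySem.Dict.get?_of_mem_items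
  · rw [pvItems]; exact h
  · decide

-- findIdx on a 6-element boolean list: bounded by a true position, and true at its value
lemma pvFIdx_le (a0 a1 a2 a3 a4 a5 : Bool) (i : Nat) (hi : i < 6)
    (h : [a0, a1, a2, a3, a4, a5].getD i false = true) :
    [a0, a1, a2, a3, a4, a5].findIdx id ≤ i := by
  interval_cases i <;> revert h <;> revert a0 a1 a2 a3 a4 a5 <;> decide

lemma pvFIdx_get (a0 a1 a2 a3 a4 a5 : Bool)
    (h : [a0, a1, a2, a3, a4, a5].findIdx id < 6) :
    [a0, a1, a2, a3, a4, a5].getD ([a0, a1, a2, a3, a4, a5].findIdx id) false = true := by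
  revert h; revert a0 a1 a2 a3 a4 a5; decide

lemma pvTarget_le (l : List Char) : pvTarget l ≤ 6 := by
  have h : (pvM l).length = 6 := by simp [pvM, pvRules]
  simpa [pvTarget, h] using List.findIdx_le_length (p := id) (xs := pvM l)

lemma pvQ_getD (l : List Char) (p : Nat) (hp : p < 6) :
    (pvQ l).getD p false = (pvRules.getD p []).any (fun w => decide (w.toList <+: l)) := by
  interval_cases p <;> rfl

lemma pvQ_expand (l : List Char) :
    pvQ l = [(pvQ l).getD 0 false, (pvQ l).getD 1 false, (pvQ l).getD 2 false,
      (pvQ l).getD 3 false, (pvQ l).getD 4 false, (pvQ l).getD 5 false] := by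
  simp [pvQ, pvRules]

-- a keyword of rule p being a prefix of l pushes pvH down to p
lemma pvH_hit (l : List Char) (w : String) (p : Nat)
    (hw : (w, p) ∈ pvKeywords) (hp : w.toList <+: l) : pvH l ≤ p := by
  have hp6 : p < 6 := by fin_cases hw <;> decide
  have hwr : w ∈ pvRules.getD p [] := by fin_cases hw <;> decide
  have hq : (pvQ l).getD p false = true := by
    rw [pvQ_getD l p hp6]
    exact List.any_eq_true.mpr ⟨w, hwr, decide_eq_true hp⟩
  unfold pvH
  rw [pvQ_expand l] at hq ⊢
  exact pvFIdx_le _ _ _ _ _ _ p hp6 hq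

-- pvH < 6 exhibits a keyword of that rule as a prefix of l
lemma pvH_wit (l : List Char) (h : pvH l < 6) :
    ∃ w : String, (w, pvH l) ∈ pvKeywords ∧ w.toList <+: l := by
  have hq : (pvQ l).getD (pvH l) false = true := by
    have h' : pvH l < 6 := h
    unfold pvH at h' ⊢
    rw [pvQ_expand l] at h' ⊢
    exact pvFIdx_get _ _ _ _ _ _ h'
  rw [pvQ_getD l _ h] at hq
  obtain ⟨w, hwr, hdec⟩ := List.any_eq_true.mp hq
  refine ⟨w, ?_, of_decide_eq_true hdec⟩
  set i := pvH l with hi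
  clear hi hq hdec
  interval_cases i <;> fin_cases hwr <;> decide

-- every keyword length is one of the scanned lengths
lemma pvLen_mem (w : String) (p : Nat) (hw : (w, p) ∈ pvKeywords) : w.toList.length ∈ pvLens := by
  fin_cases hw <;> decide

-- CORE: the inner fold over the 8 lengths computes min b (pvH l)
lemma pvInner_eq (l : List Char) (b : Nat) (hb : b ≤ 6) :
    pvLens.foldl (pvStep l) b = min b (pvH l) := by
  apply le_antisymm
  · rcases Nat.lt_or_ge (pvH l) 6 with h6 | h6
    · refine le_min (pvFold_le l _ b) ?_
      obtain ⟨w, hwmem, hwpre⟩ := pvH_wit l h6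
      have htake : l.take w.toList.length = w.toList := (List.prefix_iff_eq_take.mp hwpre).symm
      refine pvFold_hit_le l pvLens b w.toList.length (pvH l) (pvLen_mem w _ hwmem) ?_
      rw [htake]
      have hw : String.ofList w.toList = w := by simp
      rw [hw]
      exact pvDict_fwd w (pvH l) hwmem
    · have : min b (pvH l) = b := Nat.min_eq_left (le_trans hb h6)
      rw [this]; exact pvFold_le l _ b
  · rcases pvFold_attain l pvLens b with h | ⟨L, _, hget⟩
    · rw [h]; exact Nat.min_le_left _ _
    · set r := pvLens.foldl (pvStep l) b with hr
      have hmem := pvDict_inv _ _ hget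
      have hpre : (String.ofList (l.take L)).toList <+: l := by
        simpa using List.take_prefix L l
      have := pvH_hit l _ r hmem hpre
      exact le_trans (Nat.min_le_right b (pvH l)) this

-- isIn on a cons splits into prefix-here or isIn the tail
lemma pvIsIn_cons (w : List Char) (c : Char) (rest : List Char) :
    PySem.Chars.isIn w (c :: rest) = (decide (w <+: (c :: rest)) || PySem.Chars.isIn w rest) := by
  rw [Bool.eq_iff_iff]
  simp only [Bool.or_eq_true, decide_eq_true_eq, PySem.Chars.isIn_iff_infix]
  exact List.infix_cons_iff

lemma pvAny_or {α : Type} (l : List α) (f g : α → Bool) :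
    l.any (fun x => f x || g x) = (l.any f || l.any g) := by
  induction l with
  | nil => rfl
  | cons a t ih => simp [List.any_cons, ih, Bool.or_assoc, Bool.or_left_comm]

-- first-true index distributes over pointwise 'or' of two 6-element lists as min
lemma pvFIdx_min (a0 a1 a2 a3 a4 a5 b0 b1 b2 b3 b4 b5 : Bool) :
    [a0 || b0, a1 || b1, a2 || b2, a3 || b3, a4 || b4, a5 || b5].findIdx id =
    min ([a0, a1, a2, a3, a4, a5].findIdx id) ([b0, b1, b2, b3, b4, b5].findIdx id) := by
  revert a0 a1 a2 a3 a4 a5 b0 b1 b2 b3 b4 b5; decide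

lemma pvTarget_cons (c : Char) (rest : List Char) :
    pvTarget (c :: rest) = min (pvH (c :: rest)) (pvTarget rest) := by
  unfold pvTarget pvH pvM pvQ
  simp only [pvRules, List.map, pvIsIn_cons, pvAny_or]
  exact pvFIdx_min _ _ _ _ _ _ _ _ _ _ _ _

lemma pvScan_eq (l : List Char) : ∀ b ≤ 6, pvScan l b = min b (pvTarget l) := by
  induction l with
  | nil =>
    intro b hb
    have : pvTarget [] = 6 := by decide
    simp [pvScan, this, Nat.min_eq_left hb]
  | cons c rest ih =>
    intro b hb
    have hinner : pvLens.foldl (pvStep (c :: rest)) b = min b (pvH (c :: rest)) :=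
      pvInner_eq (c :: rest) b hb
    have hle : pvLens.foldl (pvStep (c :: rest)) b ≤ 6 := le_trans (pvFold_le _ _ _) hb
    calc pvScan (c :: rest) b
        = pvScan rest (pvLens.foldl (pvStep (c :: rest)) b) := rfl
      _ = min (pvLens.foldl (pvStep (c :: rest)) b) (pvTarget rest) := ih _ hle
      _ = min (min b (pvH (c :: rest))) (pvTarget rest) := by rw [hinner]
      _ = min b (min (pvH (c :: rest)) (pvTarget rest)) := Nat.min_assoc _ _ _
      _ = min b (pvTarget (c :: rest)) := by rw [pvTarget_cons]

-- A's if/elif chain equals the role table indexed by the first-true rule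
lemma pvChain (m0 m1 m2 m3 m4 m5 : Bool) :
    (if m0 then "primary_contact"
     else if m1 then "booking_specialist"
     else if m2 then "information_specialist"
     else if m3 then "support_specialist"
     else if m4 then "sales_specialist"
     else if m5 then "manager"
     else "specialist") =
    (if [m0, m1, m2, m3, m4, m5].findIdx id < 6
     then pvRoles.getD ([m0, m1, m2, m3, m4, m5].findIdx id) "specialist"
     else "specialist") := by
  revert m0 m1 m2 m3 m4 m5; decide

-- ===== VERDICT (by name: the statement is the Claim_ definition above) =====
theorem infer_role_from_name_py_spec : Claim_equal_infer_role_from_name_py := by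
  intro s _
  unfold Spec_infer_role_from_name_py infer_role_from_name_py infer_role_from_name_py_alt
  have hscan : pvScan (PySem.Str.lower s).toList 6 = pvTarget (PySem.Str.lower s).toList := by
    rw [pvScan_eq _ 6 (le_refl 6), Nat.min_eq_right (pvTarget_le _)]
  rw [hscan]
  have : pvTarget (PySem.Str.lower s).toList = (pvM (PySem.Str.lower s).toList).findIdx id := rfl
  simp only [PySem.Str.isIn_eq]
  have hM : pvM (PySem.Str.lower s).toList =
      [["triage", "reception", "front", "main"].any (fun w => PySem.Chars.isIn w.toList (PySem.Str.lower s).toList),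
       ["book", "schedule", "appointment", "calendar"].any (fun w => PySem.Chars.isIn w.toList (PySem.Str.lower s).toList),
       ["info", "information", "research", "data"].any (fun w => PySem.Chars.isIn w.toList (PySem.Str.lower s).toList),
       ["support", "help", "assist"].any (fun w => PySem.Chars.isIn w.toList (PySem.Str.lower s).toList),
       ["sales", "sell", "consult"].any (fun w => PySem.Chars.isIn w.toList (PySem.Str.lower s).toList),
       ["manager", "supervisor", "escalation"].any (fun w => PySem.Chars.isIn w.toList (PySem.Str.lower s).toList)] := by
    simp [pvM, pvRules]
  rw [pvTarget, hM]
  exact pvChain _ _ _ _ _ _
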